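-- pv_equiv track=rewrite | github.com/marcelblijleven/adventofcode | src/adventofcode/year_2020/day_13_2020.py | get_departure_times
-- ===== SOURCE A (Python) =====
-- DepartureTimes = dict[int, list[int]]
--
-- def get_departure_times(timestamp: int, busses: list[int]) -> DepartureTimes:
--     departure_times: DepartureTimes = {}
--
--     for bus in busses:
--         departure_times[bus] = []
--
--     while not all([len(value) for value in departure_times.values()]):  # noqa
--         for bus in busses:
--             if timestamp % bus == 0:
--                 departure_times[bus].append(timestamp)
--
--         timestamp += 1
--
--     return departure_times
-- ===== SOURCE B (Python) =====
-- def get_departure_times(timestamp, busses):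
--     if not busses:
--         return {}
--     # First departure of each bus at or after `timestamp` (ceiling via modular arithmetic).
--     firsts = {bus: timestamp + (-timestamp) % abs(bus) for bus in busses}
--     # The scan only needs to reach the latest of those first departures.
--     stop = max(firsts.values())
--     return {bus: list(range(first, stop + 1, abs(bus))) for bus, first in firsts.items()}
-- ===== Notes on version B (the rewrite author's own statement) =====
-- stated objective: faster
-- what changed: A scans the timeline second by second, re-testing every bus at every second until each has departed; B computes each bus's first departure directly with a modular (ceiling) formula, takes the maximum as the stop second, and enumerates each bus's departures by stepping through its multiples with range(first, stop+1, abs(bus)). Pre_ excludes inputs containing bus 0 (A raises ZeroDivisionError there) and lists with duplicate bus ids, on which A's per-occurrence double-appending into the single dict entry is an accidental artefact of iterating the list while keying the dict.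
-- outside the precondition, e.g. on get_departure_times(0, [2, 2]): A returns {2: [0, 0]}, B returns {2: [0]}
import Mathlib
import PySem

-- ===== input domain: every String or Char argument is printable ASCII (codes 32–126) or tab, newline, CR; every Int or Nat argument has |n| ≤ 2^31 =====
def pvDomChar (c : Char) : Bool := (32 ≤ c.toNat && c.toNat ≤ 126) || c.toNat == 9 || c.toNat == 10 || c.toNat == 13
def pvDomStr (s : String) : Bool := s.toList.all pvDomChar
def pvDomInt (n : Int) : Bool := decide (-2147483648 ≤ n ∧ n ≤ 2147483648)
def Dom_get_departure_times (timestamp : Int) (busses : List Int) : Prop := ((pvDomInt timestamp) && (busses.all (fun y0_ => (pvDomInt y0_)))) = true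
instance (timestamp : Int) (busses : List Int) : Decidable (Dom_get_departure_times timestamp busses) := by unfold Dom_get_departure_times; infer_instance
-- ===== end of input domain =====

-- B replaces A's second-by-second scan of the timeline with direct arithmetic: the first
-- departure of each bus comes from a ceiling (modular) formula, the scan's stopping second is
-- their maximum, and each bus's departures are enumerated by stepping through its multiples.

-- ===== PORT A =====
-- one pass of A's inner `for bus in busses` loop at second `timestamp`
def gdtBody (timestamp : Int) (busses : List Int) (d : PySem.Dict Int (List Int)) : PySem.Dict Int (List Int) :=
  busses.foldl (fun d bus =>
    if PySem.Int.mod timestamp bus == 0 then d.modify bus [] (· ++ [timestamp]) else d) d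

-- A's `while` loop; `fuel` is a totality guard only (chosen ≥ the number of iterations A performs
-- whenever 0 ∉ busses; A raises ZeroDivisionError when 0 ∈ busses, excluded by Pre_)
def gdtLoop (fuel : Nat) (timestamp : Int) (busses : List Int) (d : PySem.Dict Int (List Int)) : PySem.Dict Int (List Int) :=
  match fuel with
  | 0 => d
  | fuel + 1 =>
    if ((PySem.Dict.values d).map (fun v => (v.length : Int))).all (fun n => !(n == 0)) then d
    else gdtLoop fuel (timestamp + 1) busses (gdtBody timestamp busses d)

def gdtFuel (busses : List Int) : Nat := (busses.map Int.natAbs).foldl max 0 + 2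

def get_departure_times (timestamp : Int) (busses : List Int) : List (Int × List Int) :=
  (gdtLoop (gdtFuel busses) timestamp busses
    (busses.foldl (fun d bus => d.insert bus ([] : List Int)) PySem.Dict.empty)).items

-- ===== PORT B =====
def get_departure_times_alt (timestamp : Int) (busses : List Int) : List (Int × List Int) :=
  if busses.isEmpty then []
  else
    let firsts : PySem.Dict Int Int :=
      busses.foldl
        (fun f bus => f.insert bus (timestamp + PySem.Int.mod (-timestamp) (bus.natAbs : Int)))
        PySem.Dict.empty
    -- Python's max on the (nonempty) values list; `.getD 0` is unreachable
    let stop : Int := (PySem.List.max? (PySem.Dict.values firsts) (fun x => x)).getD 0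
    (PySem.Dict.items firsts).map (fun p =>
      (p.1, PySem.List.pyRange p.2 (stop + 1) (p.1.natAbs : Int)))

-- ===== PRECONDITION & SPEC =====
-- Pre_ excludes inputs containing bus 0, on which A raises ZeroDivisionError (timestamp % 0),
-- and lists with duplicate bus ids, on which A's per-occurrence double-appending into the single
-- dict entry is an accidental artefact of iterating the list while keying the dict.
def Pre_get_departure_times (timestamp : Int) (busses : List Int) : Prop :=
  (0 : Int) ∉ busses ∧ busses.Nodup
instance (timestamp : Int) (busses : List Int) : Decidable (Pre_get_departure_times timestamp busses) := by unfold Pre_get_departure_times; infer_instance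

def pvWitness_get_departure_times : Int × List Int := (7, [3, 5, 2])

def Spec_get_departure_times (timestamp : Int) (busses : List Int) (out : List (Int × List Int)) : Prop := out = get_departure_times_alt timestamp busses
instance (timestamp : Int) (busses : List Int) (out : List (Int × List Int)) : Decidable (Spec_get_departure_times timestamp busses out) := by unfold Spec_get_departure_times; infer_instance

-- ===== CLAIM (what is proved, stated in full; the proofs are below) =====
def Claim_equal_get_departure_times : Prop := ∀ (timestamp : Int) (busses : List Int), Dom_get_departure_times timestamp busses → Pre_get_departure_times timestamp busses → Spec_get_departure_times timestamp busses (get_departure_times timestamp busses)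

-- ===== LEMMAS AND PROOFS =====

-- first departure of bus b at or after second ts
def pvFirst (ts b : Int) : Int := ts + PySem.Int.mod (-ts) (b.natAbs : Int)

-- the last second A's scan processes
def pvStop (ts : Int) (busses : List Int) : Int :=
  (PySem.List.max? ((PySem.List.dedup busses).map (pvFirst ts)) (fun x => x)).getD 0

-- bus b's departure list after A has processed seconds [ts, t)
def pvColl (ts : Int) (busses : List Int) (b t : Int) : List Int :=
  (PySem.List.pyRange (pvFirst ts b) t (b.natAbs : Int)).flatMap
    (fun u => List.replicate (busses.count b) u)

lemma pvFirst_ge {ts b : Int} (hb : b ≠ 0) : ts ≤ pvFirst ts b := by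
  have hm : (0:Int) < (b.natAbs : Int) := by
    have := Int.natAbs_pos.mpr hb; exact_mod_cast this
  have := PySem.Int.mod_nonneg (-ts) hm
  unfold pvFirst; omega

lemma pvFirst_lt {ts b : Int} (hb : b ≠ 0) : pvFirst ts b < ts + (b.natAbs : Int) := by
  have hm : (0:Int) < (b.natAbs : Int) := by
    have := Int.natAbs_pos.mpr hb; exact_mod_cast this
  have := PySem.Int.mod_lt (-ts) hm
  unfold pvFirst; omega

lemma pvFirst_dvd {ts b : Int} (hb : b ≠ 0) : (b.natAbs : Int) ∣ pvFirst ts b := by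
  have hm : (0:Int) < (b.natAbs : Int) := by
    have := Int.natAbs_pos.mpr hb; exact_mod_cast this
  rw [pvFirst, PySem.Int.mod_eq_emod_of_pos hm, Int.emod_def]
  exact ⟨-((-ts) / (b.natAbs : Int)), by ring⟩

lemma ceil_count {s x q r : Int} (hs : 0 < s) (hx : x = s * q + r) (hr0 : 0 ≤ r)
    (hrs : r < s) (hq : 0 ≤ q) :
    (if 0 < x then ((x + s - 1) / s).toNat else 0) = if r = 0 then q.toNat else q.toNat + 1 := by
  have hsq : 0 ≤ s * q := mul_nonneg hs.le hq
  by_cases hr : r = 0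
  · subst hr
    by_cases hx0 : 0 < x
    · rw [if_pos hx0, if_pos rfl]
      have he : x + s - 1 = (s - 1) + q * s := by rw [hx]; ring
      rw [he, Int.add_mul_ediv_right _ _ (ne_of_gt hs),
        Int.ediv_eq_zero_of_lt (by omega) (by omega)]
      omega
    · rw [if_neg hx0, if_pos rfl]
      have hq0 : q = 0 := by nlinarith
      omega
  · have hx0 : 0 < x := by omega
    rw [if_pos hx0, if_neg hr]
    have he : x + s - 1 = (r - 1) + (q + 1) * s := by rw [hx]; ring
    rw [he, Int.add_mul_ediv_right _ _ (ne_of_gt hs),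
      Int.ediv_eq_zero_of_lt (by omega) (by omega)]
    omega

-- extending a positive-step range by one more candidate endpoint
lemma pyRange_succ_right_of_pos {a t s : Int} (hs : 0 < s) :
    PySem.List.pyRange a (t + 1) s
      = PySem.List.pyRange a t s ++ (if a ≤ t ∧ s ∣ (t - a) then [t] else []) := by
  rw [PySem.List.pyRange_of_pos _ _ hs, PySem.List.pyRange_of_pos _ _ hs]
  by_cases hat : a ≤ t
  · have hq0 : 0 ≤ (t - a) / s := Int.ediv_nonneg (by omega) hs.le
    have hr0 : 0 ≤ (t - a) % s := Int.emod_nonneg _ (ne_of_gt hs)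
    have hrs : (t - a) % s < s := Int.emod_lt_of_pos _ hs
    have hqr : t - a = s * ((t - a) / s) + (t - a) % s := by
      rw [Int.emod_def]; ring
    set q := (t - a) / s with hqdef
    set r := (t - a) % s with hrdef
    have hdvd_iff : s ∣ (t - a) ↔ r = 0 := by
      rw [hrdef]; exact ⟨Int.emod_eq_zero_of_dvd, Int.dvd_of_emod_eq_zero⟩
    have hc0 : (if a < t then ((t - a + s - 1) / s).toNat else 0)
        = if r = 0 then q.toNat else q.toNat + 1 := by
      have h := ceil_count hs hqr hr0 hrs hq0
      simp only [show (0 < t - a) ↔ (a < t) from by omega] at h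
      exact h
    by_cases hr : r = 0
    · -- t is itself a multiple: exactly one more element, namely t
      have hta : t - a = s * q := by omega
      have hc1 : (if a < t + 1 then ((t + 1 - a + s - 1) / s).toNat else 0) = q.toNat + 1 := by
        by_cases h1 : s = 1
        · have hd : t + 1 - a = s * (q + 1) + 0 := by
            have h2 : s * (q + 1) + 0 = s * q + s := by ring
            rw [h2]; linarith
          have h := ceil_count hs hd (le_refl 0) hs (by omega)
          simp only [show (0 < t + 1 - a) ↔ (a < t + 1) from by omega] at h
          rw [h]; simp; omega
        · have hd : t + 1 - a = s * q + 1 := by linarith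
          have h := ceil_count hs hd (by omega) (by omega) hq0
          simp only [show (0 < t + 1 - a) ↔ (a < t + 1) from by omega] at h
          rw [h]; simp
      rw [hc0, hc1, if_pos hr, if_pos ⟨hat, hdvd_iff.mpr hr⟩, List.range_succ, List.map_append]
      congr 1
      simp only [List.map_cons, List.map_nil]
      congr 1
      have : (q.toNat : Int) = q := Int.toNat_of_nonneg hq0
      rw [this]; linarith
    · -- t is not a multiple: the element count is unchanged
      have hc1 : (if a < t + 1 then ((t + 1 - a + s - 1) / s).toNat else 0) = q.toNat + 1 := by
        by_cases h1 : r + 1 = s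
        · have hd : t + 1 - a = s * (q + 1) + 0 := by
            have h2 : s * (q + 1) + 0 = s * q + s := by ring
            rw [h2]; linarith
          have h := ceil_count hs hd (le_refl 0) hs (by omega)
          simp only [show (0 < t + 1 - a) ↔ (a < t + 1) from by omega] at h
          rw [h]; simp; omega
        · have hd : t + 1 - a = s * q + (r + 1) := by linarith
          have h := ceil_count hs hd (by omega) (by omega) hq0
          simp only [show (0 < t + 1 - a) ↔ (a < t + 1) from by omega] at h
          rw [h]; simp; omega
      rw [hc0, hc1, if_neg hr, if_neg (by rw [hdvd_iff]; exact fun h => absurd h.2 hr),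
        List.append_nil]
  · -- a > t: both ranges are empty and no element is appended
    have h1 : ¬ a < t := by omega
    have h2 : ¬ a < t + 1 := by omega
    simp [h1, h2, hat]

lemma pvColl_empty_of_not_mem {ts : Int} {busses : List Int} {b t : Int} (h : b ∉ busses) :
    pvColl ts busses b t = [] := by
  simp [pvColl, List.count_eq_zero_of_not_mem h]

lemma pvColl_init {ts : Int} {busses : List Int} (b : Int) :
    pvColl ts busses b ts = [] := by
  by_cases hb : b = 0
  · subst hb; simp [pvColl, PySem.List.pyRange]
  · have hm : (0:Int) < (b.natAbs : Int) := by
      have := Int.natAbs_pos.mpr hb; exact_mod_cast this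
    have hge := pvFirst_ge (ts := ts) hb
    unfold pvColl
    rw [PySem.List.pyRange_of_pos _ _ hm, if_neg (by omega)]
    simp

lemma pvColl_step {ts : Int} {busses : List Int} {b t : Int} (h0 : (0 : Int) ∉ busses)
    (ht : ts ≤ t) :
    pvColl ts busses b (t + 1)
      = pvColl ts busses b t
        ++ (if PySem.Int.mod t b = 0 then List.replicate (busses.count b) t else []) := by
  by_cases hmem : b ∈ busses
  · have hb : b ≠ 0 := fun h => h0 (h ▸ hmem)
    have hm : (0:Int) < (b.natAbs : Int) := by
      have := Int.natAbs_pos.mpr hb; exact_mod_cast this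
    have hdvd_first := pvFirst_dvd (ts := ts) hb
    have hnat : ∀ x : Int, (b.natAbs : Int) ∣ x ↔ b ∣ x := fun x => Int.natAbs_dvd
    have hcond : (pvFirst ts b ≤ t ∧ (b.natAbs : Int) ∣ (t - pvFirst ts b))
        ↔ PySem.Int.mod t b = 0 := by
      rw [PySem.Int.mod_eq_zero_iff_dvd]
      constructor
      · rintro ⟨_, hd⟩
        rw [← hnat]
        simpa using hd.add hdvd_first
      · intro hd
        have hd' : (b.natAbs : Int) ∣ (t - pvFirst ts b) := ((hnat _).mpr hd).sub hdvd_first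
        refine ⟨?_, hd'⟩
        by_contra hlt
        push Not at hlt
        have h1 : (b.natAbs : Int) ∣ (pvFirst ts b - t) := by
          rw [show pvFirst ts b - t = -(t - pvFirst ts b) from by ring]
          exact dvd_neg.mpr hd'
        have h2 : (b.natAbs : Int) ≤ pvFirst ts b - t := Int.le_of_dvd (by omega) h1
        have := pvFirst_lt (ts := ts) hb
        omega
    unfold pvColl
    rw [pyRange_succ_right_of_pos hm, List.flatMap_append]
    congr 1
    by_cases hc : PySem.Int.mod t b = 0
    · rw [if_pos (hcond.mpr hc), if_pos hc]; simp
    · rw [if_neg (fun h => hc (hcond.mp h)), if_neg hc]; simp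
  · rw [pvColl_empty_of_not_mem hmem, pvColl_empty_of_not_mem hmem,
      List.count_eq_zero_of_not_mem hmem]
    split <;> simp

lemma pvColl_ne_nil_iff {ts : Int} {busses : List Int} {b t : Int} (hb : b ∈ busses)
    (h0 : (0 : Int) ∉ busses) :
    pvColl ts busses b t ≠ [] ↔ pvFirst ts b < t := by
  have hbz : b ≠ 0 := fun h => h0 (h ▸ hb)
  have hm : (0:Int) < (b.natAbs : Int) := by
    have := Int.natAbs_pos.mpr hbz; exact_mod_cast this
  have hcnt : 0 < busses.count b := List.count_pos_iff.mpr hb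
  unfold pvColl
  rw [PySem.List.pyRange_of_pos _ _ hm]
  constructor
  · intro h
    by_contra hlt
    push Not at hlt
    rw [if_neg (by omega)] at h
    simp at h
  · intro h
    rw [if_pos h]
    have h1 : (1:Int) ≤ (t - pvFirst ts b + (b.natAbs : Int) - 1) / (b.natAbs : Int) := by
      rw [Int.le_ediv_iff_mul_le hm]; omega
    intro hcontra
    rw [List.flatMap_eq_nil_iff] at hcontra
    have h0lt : 0 < ((t - pvFirst ts b + (b.natAbs : Int) - 1) / (b.natAbs : Int)).toNat := by
      omega
    have hmem0 := hcontra _ (List.mem_map_of_mem (List.mem_range.mpr h0lt))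
    rw [List.replicate_eq_nil_iff] at hmem0
    omega

lemma gdtInit_getD (l : List Int) (d : PySem.Dict Int (List Int)) (b : Int)
    (h : d.getD b [] = []) :
    (l.foldl (fun d bus => d.insert bus ([] : List Int)) d).getD b [] = [] := by
  induction l generalizing d with
  | nil => exact h
  | cons x l ih =>
    simp only [List.foldl_cons]
    apply ih
    rw [PySem.Dict.getD_insert]
    split <;> simp [h]

lemma gdtBody_getD (l : List Int) (u : Int) (d : PySem.Dict Int (List Int)) (b : Int) :
    (l.foldl (fun d bus =>
        if PySem.Int.mod u bus == 0 then d.modify bus [] (· ++ [u]) else d) d).getD b []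
      = d.getD b [] ++ (if PySem.Int.mod u b = 0 then List.replicate (l.count b) u else []) := by
  induction l generalizing d with
  | nil => split <;> simp
  | cons x l ih =>
    simp only [List.foldl_cons]
    rw [ih]
    by_cases hxb : x = b
    · subst hxb
      by_cases hm : PySem.Int.mod u x = 0
      · rw [if_pos (by exact beq_iff_eq.mpr hm), PySem.Dict.getD_modify, if_pos rfl,
          if_pos hm, if_pos hm, List.count_cons_self, List.replicate_succ, List.append_assoc]
        rfl
      · rw [if_neg (by simp [hm]), if_neg hm, if_neg hm]
    · have hcnt : (x :: l).count b = l.count b := by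
        simp [hxb]
      rw [hcnt]
      by_cases hm : PySem.Int.mod u x = 0
      · rw [if_pos (by exact beq_iff_eq.mpr hm), PySem.Dict.getD_modify, if_neg (fun h : b = x => hxb h.symm)]
      · rw [if_neg (by simp [hm])]

lemma gdtBody_keys (l : List Int) (u : Int) (d : PySem.Dict Int (List Int))
    (h : ∀ x ∈ l, d.contains x = true) :
    (l.foldl (fun d bus =>
        if PySem.Int.mod u bus == 0 then d.modify bus [] (· ++ [u]) else d) d).keys = d.keys := by
  induction l generalizing d with
  | nil => rfl
  | cons x l ih =>
    simp only [List.foldl_cons]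
    by_cases hm : PySem.Int.mod u x = 0
    · rw [if_pos (by exact beq_iff_eq.mpr hm)]
      have hk : (d.modify x [] (· ++ [u])).keys = d.keys := by
        rw [PySem.Dict.keys_modify, PySem.Dict.keys_insert_of_contains _ _ (h x List.mem_cons_self)]
      rw [ih _ ?_, hk]
      intro y hy
      rw [PySem.Dict.contains_iff_mem_keys, hk, ← PySem.Dict.contains_iff_mem_keys]
      exact h y (List.mem_cons_of_mem _ hy)
    · rw [if_neg (by simp [hm])]
      exact ih _ (fun y hy => h y (List.mem_cons_of_mem _ hy))

lemma dedup_ne_nil {busses : List Int} (hb : busses ≠ []) : PySem.List.dedup busses ≠ [] := by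
  cases busses with
  | nil => exact absurd rfl hb
  | cons x xs =>
    intro hnil
    have hx : x ∈ PySem.List.dedup (x :: xs) :=
      (PySem.List.mem_dedup _ _).mpr List.mem_cons_self
    rw [hnil] at hx
    exact absurd hx (List.not_mem_nil)

lemma pvStop_spec {ts : Int} {busses : List Int} (hb : busses ≠ []) :
    (∃ b0 ∈ busses, pvStop ts busses = pvFirst ts b0) ∧
      ∀ b ∈ busses, pvFirst ts b ≤ pvStop ts busses := by
  obtain ⟨m, hmax⟩ : ∃ m,
      PySem.List.max? ((PySem.List.dedup busses).map (pvFirst ts)) (fun x => x) = some m := by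
    cases hcase : PySem.List.max? ((PySem.List.dedup busses).map (pvFirst ts)) (fun x => x) with
    | none =>
      rw [PySem.List.max?_eq_none_iff, List.map_eq_nil_iff] at hcase
      exact absurd hcase (dedup_ne_nil hb)
    | some m => exact ⟨m, rfl⟩
  have hstop : pvStop ts busses = m := by rw [pvStop, hmax]; rfl
  obtain ⟨b0, hb0D, hb0⟩ := List.mem_map.mp (PySem.List.max?_mem hmax)
  have hbound := PySem.List.max?_isMax hmax
  refine ⟨⟨b0, (PySem.List.mem_dedup _ _).mp hb0D, by rw [hstop, hb0]⟩, ?_⟩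
  intro b hbmem
  have := hbound _ (List.mem_map_of_mem ((PySem.List.mem_dedup busses b).mpr hbmem))
  rw [hstop]
  exact this

lemma gdtExit_iff {ts t : Int} {busses : List Int} (d : PySem.Dict Int (List Int))
    (hb : busses ≠ []) (h0 : (0 : Int) ∉ busses)
    (hk : d.keys = PySem.List.dedup busses)
    (hv : ∀ b, d.getD b [] = pvColl ts busses b t) :
    (((PySem.Dict.values d).map (fun v => (v.length : Int))).all (fun n => !(n == 0)) = true)
      ↔ pvStop ts busses < t := by
  have hnodup : (PySem.List.dedup busses).Nodup := by
    rw [PySem.List.dedup_eq_ofList]; exact PySem.Set.nodup_ofList busses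
  have hvals : PySem.Dict.values d
      = (PySem.List.dedup busses).map (fun b => pvColl ts busses b t) := by
    rw [PySem.Dict.values_eq_map_keys d (by rw [hk]; exact hnodup) [], hk]
    exact List.map_congr_left (fun b _ => hv b)
  rw [hvals]
  have hiff1 : (((PySem.List.dedup busses).map (fun b => pvColl ts busses b t)).map
        (fun v => (v.length : Int))).all (fun n => !(n == 0)) = true
      ↔ ∀ b ∈ PySem.List.dedup busses, pvColl ts busses b t ≠ [] := by
    simp [List.all_eq_true, List.length_eq_zero_iff]
  rw [hiff1]
  obtain ⟨⟨b0, hb0mem, hb0⟩, hbound⟩ := pvStop_spec (ts := ts) hb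
  constructor
  · intro h
    have := (pvColl_ne_nil_iff hb0mem h0).mp
      (h b0 ((PySem.List.mem_dedup _ _).mpr hb0mem))
    omega
  · intro h b hbD
    have hbmem : b ∈ busses := (PySem.List.mem_dedup _ _).mp hbD
    have := hbound b hbmem
    exact (pvColl_ne_nil_iff hbmem h0).mpr (by omega)

lemma gdtLoop_inv (ts : Int) (busses : List Int) (hb : busses ≠ []) (h0 : (0 : Int) ∉ busses) :
    ∀ (fuel : Nat) (t : Int) (d : PySem.Dict Int (List Int)),
      d.keys = PySem.List.dedup busses →
      (∀ b, d.getD b [] = pvColl ts busses b t) →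
      ts ≤ t → t ≤ pvStop ts busses + 1 →
      (pvStop ts busses + 1 - t).toNat < fuel →
      (gdtLoop fuel t busses d).keys = PySem.List.dedup busses ∧
        ∀ b, (gdtLoop fuel t busses d).getD b [] = pvColl ts busses b (pvStop ts busses + 1) := by
  intro fuel
  induction fuel with
  | zero => intro t d _ _ _ _ hf; omega
  | succ fuel ih =>
    intro t d hk hv hts htle hf
    simp only [gdtLoop]
    have hext := gdtExit_iff (ts := ts) d hb h0 hk hv
    by_cases hstop : pvStop ts busses < t
    · have ht : t = pvStop ts busses + 1 := by omega
      rw [if_pos (hext.mpr hstop)]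
      exact ⟨hk, fun b => ht ▸ hv b⟩
    · rw [if_neg (fun hc => hstop (hext.mp hc))]
      refine ih (t + 1) (gdtBody t busses d) ?_ ?_ (by omega) (by omega) (by omega)
      · unfold gdtBody
        rw [gdtBody_keys _ _ _ ?_, hk]
        intro x hx
        rw [PySem.Dict.contains_iff_mem_keys, hk, PySem.List.mem_dedup]
        exact hx
      · intro b
        unfold gdtBody
        rw [gdtBody_getD, hv b, ← pvColl_step h0 hts]

lemma portA_eq (ts : Int) (busses : List Int) (hb : busses ≠ []) (h0 : (0 : Int) ∉ busses) :
    get_departure_times ts busses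
      = (PySem.List.dedup busses).map
          (fun b => (b, pvColl ts busses b (pvStop ts busses + 1))) := by
  have hnodup : (PySem.List.dedup busses).Nodup := by
    rw [PySem.List.dedup_eq_ofList]; exact PySem.Set.nodup_ofList busses
  obtain ⟨⟨b0, hb0mem, hb0⟩, _⟩ := pvStop_spec (ts := ts) hb
  have hb0z : b0 ≠ 0 := fun h => h0 (h ▸ hb0mem)
  have hstop_ge : ts ≤ pvStop ts busses := by
    rw [hb0]; exact pvFirst_ge hb0z
  have hstop_lt : pvStop ts busses < ts + (b0.natAbs : Int) := by
    rw [hb0]; exact pvFirst_lt hb0z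
  have hmaxcast : (b0.natAbs : Int) ≤ ((busses.map Int.natAbs).foldl max 0 : Nat) := by
    have := (PySem.List.le_foldl_max (busses.map Int.natAbs) 0).2 b0.natAbs
      (List.mem_map_of_mem hb0mem)
    exact_mod_cast this
  have hk0 : (busses.foldl (fun d bus => d.insert bus ([] : List Int))
      PySem.Dict.empty).keys = PySem.List.dedup busses := by
    rw [PySem.Dict.keys_foldl_insert busses (fun _ _ => ([] : List Int)) PySem.Dict.empty,
      PySem.Dict.keys_empty, PySem.List.dedup_eq_ofList]
    rfl
  have hv0 : ∀ b, (busses.foldl (fun d bus => d.insert bus ([] : List Int))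
      PySem.Dict.empty).getD b [] = pvColl ts busses b ts := by
    intro b
    rw [pvColl_init, gdtInit_getD]
    rfl
  obtain ⟨hkF, hvF⟩ := gdtLoop_inv ts busses hb h0 (gdtFuel busses) ts _ hk0 hv0 (le_refl ts)
    (by omega) (by unfold gdtFuel; omega)
  unfold get_departure_times
  rw [PySem.Dict.items_eq_map_keys _ (by rw [hkF]; exact hnodup) [], hkF]
  exact List.map_congr_left (fun b _ => by rw [hvF b])

lemma portB_eq (ts : Int) (busses : List Int) (hb : busses ≠ []) (hnd : busses.Nodup) :
    get_departure_times_alt ts busses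
      = busses.map
          (fun b => (b, PySem.List.pyRange (pvFirst ts b) (pvStop ts busses + 1) (b.natAbs : Int))) := by
  simp only [get_departure_times_alt, List.isEmpty_iff, hb, if_false]
  have hfirsts : (busses.foldl
      (fun f bus => f.insert bus (ts + PySem.Int.mod (-ts) (bus.natAbs : Int)))
      PySem.Dict.empty).items
      = busses.map (fun b => (b, pvFirst ts b)) := by
    rw [PySem.Dict.items_foldl_insert_fresh busses (fun b => b)
      (fun b => ts + PySem.Int.mod (-ts) (b.natAbs : Int)) PySem.Dict.empty
      (fun a _ => PySem.Dict.contains_empty a)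
      (by rw [show (fun (b : Int) => b) = id from rfl, List.map_id]; exact hnd)]
    rfl
  have hfvals : PySem.Dict.values (busses.foldl
      (fun f bus => f.insert bus (ts + PySem.Int.mod (-ts) (bus.natAbs : Int)))
      PySem.Dict.empty)
      = busses.map (pvFirst ts) := by
    show ((busses.foldl _ PySem.Dict.empty).items.map Prod.snd) = _
    rw [hfirsts, List.map_map]
    rfl
  have hded : PySem.List.dedup busses = busses := by
    rw [PySem.List.dedup_eq_ofList]
    exact PySem.Set.ofList_eq_self_of_nodup busses hnd
  have hstop : (PySem.List.max? (PySem.Dict.values (busses.foldl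
      (fun f bus => f.insert bus (ts + PySem.Int.mod (-ts) (bus.natAbs : Int)))
      PySem.Dict.empty)) (fun x => x)).getD 0 = pvStop ts busses := by
    rw [hfvals, pvStop, hded]
  rw [hfirsts, hstop, List.map_map]
  rfl

lemma pvColl_eq_pyRange {ts : Int} {busses : List Int} {b t : Int}
    (hnd : busses.Nodup) (hmem : b ∈ busses) :
    pvColl ts busses b t = PySem.List.pyRange (pvFirst ts b) t (b.natAbs : Int) := by
  have hcnt : busses.count b = 1 := List.count_eq_one_of_mem hnd hmem
  unfold pvColl
  rw [hcnt]
  simp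

-- ===== VERDICT (by name: the statement is the Claim_ definition above) =====
theorem get_departure_times_spec : Claim_equal_get_departure_times := by
  intro ts busses _hdom hpre
  obtain ⟨h0, hnd⟩ := hpre
  unfold Spec_get_departure_times
  by_cases hb : busses = []
  · subst hb; rfl
  · have hded : PySem.List.dedup busses = busses := by
      rw [PySem.List.dedup_eq_ofList]
      exact PySem.Set.ofList_eq_self_of_nodup busses hnd
    rw [portA_eq ts busses hb h0, portB_eq ts busses hb hnd, hded]
    exact List.map_congr_left (fun b hbm => by rw [pvColl_eq_pyRange hnd hbm])
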